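-- pv_equiv track=rewrite | github.com/CDCgov/NEDSS-Infrastructure | terraform/aws/development-infrastructure/sftp/lambda/copy_to_inbox.py | split_obrs
-- ===== SOURCE A (Python) =====
-- def split_obrs(hl7_text):
--     lines = hl7_text.strip().splitlines()
--     msh = next((l for l in lines if l.startswith("MSH|")), None)
--     pid = next((l for l in lines if l.startswith("PID|")), "")
--     if not msh:
--         return []
--
--     obr_groups = []
--     current_group = []
--     for line in lines:
--         if line.startswith("OBR|"):
--             if current_group:
--                 obr_groups.append(current_group)
--             current_group = [line]
--         elif line.startswith("OBX|") and current_group: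
--             current_group.append(line)
--     if current_group:
--         obr_groups.append(current_group)
--
--     return [f"{msh}\n{pid}\n" + "\n".join(group) for group in obr_groups]
-- ===== SOURCE B (Python) =====
-- def split_obrs(hl7_text):
--     lines = hl7_text.strip().splitlines()
--     msh = next((l for l in lines if l.startswith("MSH|")), None)
--     pid = next((l for l in lines if l.startswith("PID|")), "")
--     if not msh:
--         return []
--
--     def groups(rest):
--         # skip everything before the next OBR line
--         while rest and not rest[0].startswith("OBR|"):
--             rest = rest[1:]
--         if not rest:
--             return []
--         obr, rest = rest[0], rest[1:]
--         body = []
--         while rest and not rest[0].startswith("OBR|"):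
--             if rest[0].startswith("OBX|"):
--                 body.append(rest[0])
--             rest = rest[1:]
--         return [[obr] + body] + groups(rest)
--
--     return [f"{msh}\n{pid}\n" + "\n".join(g) for g in groups(lines)]
-- ===== Notes on version B (the rewrite author's own statement) =====
-- stated objective: alternative
-- what changed: A's single stateful pass with obr_groups/current_group accumulators is replaced by a recursive splitter that skips to the next OBR line, spans the following segment collecting its OBX lines, and recurses on the remainder; the MSH/PID header lookup and formatting are kept.
import Mathlib
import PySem

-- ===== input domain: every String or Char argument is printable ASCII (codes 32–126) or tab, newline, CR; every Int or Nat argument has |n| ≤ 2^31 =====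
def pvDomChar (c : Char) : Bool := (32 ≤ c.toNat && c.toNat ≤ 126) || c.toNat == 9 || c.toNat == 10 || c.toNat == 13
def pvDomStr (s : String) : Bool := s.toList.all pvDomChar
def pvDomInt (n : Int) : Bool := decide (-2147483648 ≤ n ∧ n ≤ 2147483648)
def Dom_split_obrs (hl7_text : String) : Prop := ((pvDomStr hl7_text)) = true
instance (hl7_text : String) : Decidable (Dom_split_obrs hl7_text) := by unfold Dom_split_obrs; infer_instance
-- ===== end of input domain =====

-- B replaces A's single stateful accumulator pass by a recursive skip-then-span splitter; same results, alternative decomposition (no speed claim).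

-- ===== PORT A =====
-- the body of A's for-loop: state = (obr_groups, current_group)
def aStep (st : List (List String) × List String) (line : String) :
    List (List String) × List String :=
  if PySem.Str.startswith line "OBR|" then
    (if st.2.isEmpty then st.1 else st.1 ++ [st.2], [line])
  else if PySem.Str.startswith line "OBX|" && !st.2.isEmpty then
    (st.1, st.2 ++ [line])
  else st

def split_obrs (hl7_text : String) : List String :=
  let lines := PySem.Str.splitlines (PySem.Str.strip hl7_text)
  let msh := lines.find? (fun l => PySem.Str.startswith l "MSH|")
  let pid := (lines.find? (fun l => PySem.Str.startswith l "PID|")).getD ""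
  match msh with
  | none => []
  | some m =>
    if m.toList.isEmpty then []  -- Python's 'not msh' is also true for an empty string
    else
      let st := lines.foldl aStep ([], [])
      let obr_groups := if st.2.isEmpty then st.1 else st.1 ++ [st.2]
      obr_groups.map (fun g => m ++ "\n" ++ pid ++ "\n" ++ PySem.Str.join "\n" g)

-- ===== PORT B =====
-- Source B's inner span loop: collect the OBX lines of the segment before the next OBR,
-- returning (body, remaining lines from the next OBR on)
def bBody : List String → List String × List String
  | [] => ([], [])
  | l :: ls =>
    if PySem.Str.startswith l "OBR|" then ([], l :: ls)
    else
      let p := bBody ls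
      (if PySem.Str.startswith l "OBX|" then l :: p.1 else p.1, p.2)

-- needed by bGroups' termination proof
theorem bBody_snd_le (ls : List String) : (bBody ls).2.length ≤ ls.length := by
  induction ls with
  | nil => simp [bBody]
  | cons l ls ih =>
    simp only [bBody]
    split
    · simp
    · simpa using Nat.le_succ_of_le ih

-- Source B's 'groups': skip to the next OBR line, span its segment, recurse on the rest
def bGroups : List String → List (List String)
  | [] => []
  | l :: ls =>
    if PySem.Str.startswith l "OBR|" then
      (l :: (bBody ls).1) :: bGroups (bBody ls).2
    else bGroups ls
termination_by ls => ls.length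
decreasing_by
  · exact Nat.lt_succ_of_le (bBody_snd_le ls)
  · simp

def split_obrs_alt (hl7_text : String) : List String :=
  let lines := PySem.Str.splitlines (PySem.Str.strip hl7_text)
  let msh := lines.find? (fun l => PySem.Str.startswith l "MSH|")
  let pid := (lines.find? (fun l => PySem.Str.startswith l "PID|")).getD ""
  match msh with
  | none => []
  | some m =>
    if m.toList.isEmpty then []  -- Python's 'not msh' is also true for an empty string
    else
      (bGroups lines).map (fun g => m ++ "\n" ++ pid ++ "\n" ++ PySem.Str.join "\n" g)

-- ===== PRECONDITION & SPEC =====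
def Spec_split_obrs (hl7_text : String) (out : List String) : Prop := out = split_obrs_alt hl7_text
instance (hl7_text : String) (out : List String) : Decidable (Spec_split_obrs hl7_text out) := by unfold Spec_split_obrs; infer_instance

-- ===== CLAIM (what is proved, stated in full; the proofs are below) =====
def Claim_equal_split_obrs : Prop := ∀ (hl7_text : String), Dom_split_obrs hl7_text → Spec_split_obrs hl7_text (split_obrs hl7_text)

-- ===== LEMMAS AND PROOFS =====

-- A's post-loop finalisation: append the open group if nonempty
def aFin (st : List (List String) × List String) : List (List String) :=
  if st.2.isEmpty then st.1 else st.1 ++ [st.2]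

-- with a nonempty open group c, A's remaining fold finishes c with the OBX lines
-- of the current segment and then behaves like B's recursion on the remainder
theorem fold_nonempty (ls : List String) :
    ∀ (gs : List (List String)) (c : List String), c.isEmpty = false →
    aFin (ls.foldl aStep (gs, c)) = gs ++ (c ++ (bBody ls).1) :: bGroups (bBody ls).2 := by
  induction ls with
  | nil => intro gs c hc; simp only [List.foldl_nil, aFin, hc, bBody, bGroups]; simp
  | cons l ls ih =>
    intro gs c hc
    rw [List.foldl_cons]
    by_cases hobr : PySem.Str.startswith l "OBR|" = true
    · have hstep : aStep (gs, c) l = (gs ++ [c], [l]) := by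
        simp only [aStep]; rw [if_pos hobr, hc]; simp
      rw [hstep, ih (gs ++ [c]) [l] rfl]
      have hb : bBody (l :: ls) = ([], l :: ls) := by
        simp only [bBody]; rw [if_pos hobr]
      have hg : bGroups (l :: ls) = (l :: (bBody ls).1) :: bGroups (bBody ls).2 := by
        simp only [bGroups]; rw [if_pos hobr]
      rw [hb]
      simp [hg]
    · by_cases hobx : PySem.Str.startswith l "OBX|" = true
      · have hstep : aStep (gs, c) l = (gs, c ++ [l]) := by
          simp only [aStep]; rw [if_neg hobr, if_pos (by rw [hobx, hc]; rfl)]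
        rw [hstep, ih gs (c ++ [l]) (by simp)]
        have hb : bBody (l :: ls) = (l :: (bBody ls).1, (bBody ls).2) := by
          simp only [bBody]; rw [if_neg hobr, if_pos hobx]
        rw [hb]
        simp
      · have hstep : aStep (gs, c) l = (gs, c) := by
          simp only [aStep]; rw [if_neg hobr, if_neg (by rw [Bool.and_eq_true]; intro h; exact hobx h.1)]
        rw [hstep, ih gs c hc]
        have hb : bBody (l :: ls) = ((bBody ls).1, (bBody ls).2) := by
          simp only [bBody]; rw [if_neg hobr, if_neg hobx]
        rw [hb]

-- with no open group, A's fold is exactly B's recursion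
theorem fold_empty (ls : List String) :
    ∀ (gs : List (List String)), aFin (ls.foldl aStep (gs, [])) = gs ++ bGroups ls := by
  induction ls with
  | nil => intro gs; simp [aFin, bGroups]
  | cons l ls ih =>
    intro gs
    rw [List.foldl_cons]
    by_cases hobr : PySem.Str.startswith l "OBR|" = true
    · have hstep : aStep (gs, []) l = (gs, [l]) := by
        simp only [aStep]; rw [if_pos hobr]; simp
      rw [hstep, fold_nonempty ls gs [l] rfl]
      have hg : bGroups (l :: ls) = (l :: (bBody ls).1) :: bGroups (bBody ls).2 := by
        simp only [bGroups]; rw [if_pos hobr]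
      rw [hg]
      simp
    · have hstep : aStep (gs, []) l = (gs, []) := by
        simp only [aStep]; rw [if_neg hobr]; simp
      rw [hstep, ih gs]
      have hg : bGroups (l :: ls) = bGroups ls := by
        simp only [bGroups]; rw [if_neg hobr]
      rw [hg]

-- ===== VERDICT (by name: the statement is the Claim_ definition above) =====
theorem split_obrs_spec : Claim_equal_split_obrs := by
  intro hl7_text _
  unfold Spec_split_obrs
  simp only [split_obrs, split_obrs_alt]
  have h := fold_empty (PySem.Str.splitlines (PySem.Str.strip hl7_text)) []
  simp only [aFin, List.nil_append] at h
  rw [h]
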